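-- pv_equiv track=rewrite | github.com/anotheranotherhoon/algorithm | 커뮤러닝/중간고사2.py | solution
-- ===== SOURCE A (Python) =====
-- def solution(people, tshirts):
--     t = {}
--     count = 0
--     for x in tshirts:
--         t[x] = t.get(x, 0) +1
--
--     for x in people:
--         if t[x]:
--             t[x] -=1
--             count +=1
--     answer = count
--     return answer
-- ===== SOURCE B (Python) =====
-- def solution(people, tshirts):
--     tcnt = {}
--     for x in tshirts:
--         tcnt[x] = tcnt.get(x, 0) + 1
--     pcnt = {}
--     for x in people:
--         pcnt[x] = pcnt.get(x, 0) + 1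
--     total = 0
--     for size, n in pcnt.items():
--         total += min(n, tcnt[size])
--     return total
-- ===== Notes on version B (the rewrite author's own statement) =====
-- stated objective: alternative
-- what changed: Replaces A's stateful stock simulation (walking people while decrementing a mutable tshirt-count dict) by counting both lists once and summing min(people_count, tshirt_count) per distinct size.
import Mathlib
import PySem

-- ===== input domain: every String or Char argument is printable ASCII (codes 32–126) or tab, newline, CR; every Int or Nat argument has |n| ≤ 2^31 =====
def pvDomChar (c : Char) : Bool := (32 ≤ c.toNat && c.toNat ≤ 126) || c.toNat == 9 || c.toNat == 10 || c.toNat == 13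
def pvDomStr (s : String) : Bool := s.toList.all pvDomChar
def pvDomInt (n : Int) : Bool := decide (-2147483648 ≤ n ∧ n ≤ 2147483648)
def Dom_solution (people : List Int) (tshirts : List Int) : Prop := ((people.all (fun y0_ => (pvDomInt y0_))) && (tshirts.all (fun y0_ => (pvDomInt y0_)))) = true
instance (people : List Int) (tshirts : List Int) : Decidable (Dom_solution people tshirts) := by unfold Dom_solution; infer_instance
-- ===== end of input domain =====

-- B counts both lists once and sums min(people_count, tshirt_count) per distinct size,
-- instead of A's stateful walk over people decrementing a mutable tshirt-count dict (alternative decomposition, same cost).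

-- ===== PORT A =====
-- Python A: t[x] raises KeyError when x is absent from t; Pre_solution excludes those inputs,
-- and inside Pre_ the key is always present, so 'getD x 0' reads exactly Python's t[x] there.
def solution (people : List Int) (tshirts : List Int) : Int :=
  let t := tshirts.foldl (fun d x => d.insert x (d.getD x 0 + 1)) PySem.Dict.empty
  let s := people.foldl
    (fun (s : PySem.Dict Int Int × Int) x =>
      if s.1.getD x 0 ≠ 0 then (s.1.insert x (s.1.getD x 0 - 1), s.2 + 1) else s)
    (t, 0)
  s.2

-- ===== PORT B =====
-- Python B: tcnt[size] raises KeyError when size is absent; inside Pre_ the key is present,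
-- so 'getD size 0' reads exactly Python's tcnt[size] there.
def solution_alt (people : List Int) (tshirts : List Int) : Int :=
  let tcnt := tshirts.foldl (fun d x => d.insert x (d.getD x 0 + 1)) PySem.Dict.empty
  let pcnt := people.foldl (fun d x => d.insert x (d.getD x 0 + 1)) PySem.Dict.empty
  pcnt.items.foldl (fun total p => total + min p.2 (tcnt.getD p.1 0)) 0

-- ===== PRECONDITION & SPEC =====
-- Pre_ excludes exactly the inputs where Python A raises KeyError (a person's size absent
-- from tshirts); Python B raises KeyError on the very same inputs.
def Pre_solution (people : List Int) (tshirts : List Int) : Prop :=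
  ∀ x ∈ people, x ∈ tshirts
instance (people : List Int) (tshirts : List Int) : Decidable (Pre_solution people tshirts) := by
  unfold Pre_solution; infer_instance
def pvWitness_solution : List Int × List Int := ([1, 2, 1, 1], [1, 1, 2, 3])

def Spec_solution (people : List Int) (tshirts : List Int) (out : Int) : Prop := out = solution_alt people tshirts
instance (people : List Int) (tshirts : List Int) (out : Int) : Decidable (Spec_solution people tshirts out) := by unfold Spec_solution; infer_instance

-- ===== CLAIM (what is proved, stated in full; the proofs are below) =====
def Claim_equal_solution : Prop := ∀ (people : List Int) (tshirts : List Int), Dom_solution people tshirts → Pre_solution people tshirts → Spec_solution people tshirts (solution people tshirts)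

-- ===== LEMMAS AND PROOFS =====

-- One distinguished key contributes one more under f than under g: the sums differ by 1.
lemma sum_map_update (keys : List Int) (f g : Int → Int) (x : Int)
    (hx : x ∈ keys) (hnd : keys.Nodup)
    (hne : ∀ k, k ≠ x → f k = g k) (hfx : f x = g x + 1) :
    (keys.map f).sum = (keys.map g).sum + 1 := by
  induction keys with
  | nil => cases hx
  | cons a rest ih =>
    rcases List.mem_cons.mp hx with h | h
    · subst h
      have : rest.map f = rest.map g := by
        apply List.map_congr_left
        intro k hk
        exact hne k (fun hk' => (List.nodup_cons.mp hnd).1 (hk' ▸ hk))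
      simp [this, hfx]; ring
    · have hax : a ≠ x := fun h' => (List.nodup_cons.mp hnd).1 (h' ▸ h)
      simp [hne a hax, ih h (List.nodup_cons.mp hnd).2]; ring

-- The sum over any nodup key list covering p of min(count in p, stock in d).
def stockSum (keys : List Int) (p : List Int) (d : PySem.Dict Int Int) : Int :=
  (keys.map (fun k => min ((p.count k : Int)) (d.getD k 0))).sum

-- A's people loop computes c + stockSum, for any nonnegative stock dict d.
lemma loopA_eq_stockSum (keys : List Int) (hnd : keys.Nodup) :
    ∀ (p : List Int) (d : PySem.Dict Int Int) (c : Int),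
      (∀ k, 0 ≤ d.getD k 0) → (∀ k ∈ p, k ∈ keys) →
      (p.foldl
        (fun (s : PySem.Dict Int Int × Int) x =>
          if s.1.getD x 0 ≠ 0 then (s.1.insert x (s.1.getD x 0 - 1), s.2 + 1) else s)
        (d, c)).2 = c + stockSum keys p d := by
  intro p
  induction p with
  | nil =>
    intro d c hpos _
    unfold stockSum
    have : keys.map (fun k => min ((([] : List Int).count k : Int)) (d.getD k 0)) =
        keys.map (fun _ => (0 : Int)) := by
      apply List.map_congr_left
      intro k _
      simp [min_eq_left (hpos k)]
    rw [this]
    simp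
  | cons x xs ih =>
    intro d c hpos hcov
    have hxk : x ∈ keys := hcov x (List.mem_cons_self)
    by_cases hv : d.getD x 0 ≠ 0
    · have hv1 : 1 ≤ d.getD x 0 := lt_of_le_of_ne (hpos x) (Ne.symm hv)
      rw [List.foldl_cons, if_pos hv]
      rw [ih (d.insert x (d.getD x 0 - 1)) (c + 1)
        (by
          intro k
          rw [PySem.Dict.getD_insert]
          split_ifs with h
          · omega
          · exact hpos k)
        (fun k hk => hcov k (List.mem_cons_of_mem _ hk))]
      have : stockSum keys (x :: xs) d = stockSum keys xs (d.insert x (d.getD x 0 - 1)) + 1 := by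
        apply sum_map_update keys _ _ x hxk hnd
        · intro k hk
          rw [PySem.Dict.getD_insert, if_neg hk]
          simp [Ne.symm hk]
        · rw [PySem.Dict.getD_insert, if_pos rfl, List.count_cons_self]
          push_cast
          omega
      rw [this]; ring
    · simp only [ne_eq, not_not] at hv
      rw [List.foldl_cons, if_neg (by simp [hv])]
      rw [ih d c hpos (fun k hk => hcov k (List.mem_cons_of_mem _ hk))]
      have : stockSum keys (x :: xs) d = stockSum keys xs d := by
        unfold stockSum
        apply congrArg
        apply List.map_congr_left
        intro k hk
        by_cases h : k = x
        · subst h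
          rw [hv]
          have h0 : (0:Int) ≤ (xs.count k : Int) := by positivity
          have h1 : (0:Int) ≤ ((k :: xs).count k : Int) := by positivity
          rw [min_eq_right h0, min_eq_right h1]
        · simp [Ne.symm h]
      rw [this]

-- ===== VERDICT (by name: the statement is the Claim_ definition above) =====
theorem solution_spec : Claim_equal_solution := by
  intro people tshirts _ _
  unfold Spec_solution
  simp only [solution, solution_alt]
  rw [PySem.Dict.foldl_insert_getD_add_one_eq_counter,
      PySem.Dict.foldl_insert_getD_add_one_eq_counter]
  rw [loopA_eq_stockSum (PySem.Set.ofList people) (PySem.Set.nodup_ofList people) people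
    (PySem.Dict.counter tshirts) 0
    (by intro k; rw [PySem.Dict.getD_counter]; positivity)
    (by intro k hk; exact (PySem.Set.mem_ofList people k).mpr hk)]
  rw [PySem.List.foldl_add (l := (PySem.Dict.counter people).items) (a := 0)
      (g := fun p => min p.2 ((PySem.Dict.counter tshirts).getD p.1 0))]
  rw [PySem.Dict.items_counter]
  unfold stockSum
  simp only [List.map_map, zero_add]
  apply congrArg
  apply List.map_congr_left
  intro k _
  simp [PySem.Dict.getD_counter]
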